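-- pv_equiv track=rewrite | github.com/efcawesome/AdventOfCode2023 | Day12/Day12.py | valid_case
-- ===== SOURCE A (Python) =====
-- from copy import deepcopy
--
-- def valid_case(line):
--     spring_counts = deepcopy(line[1])
--     curr_count = 0
--
--     for c in line[0]:
--         if c == "#":
--             curr_count += 1
--             if len(spring_counts) == 0:
--                 return False
--             if curr_count > spring_counts[0]:
--                 return False
--         elif curr_count > 0:
--             if len(spring_counts) == 0:
--                 return False
--             elif curr_count == spring_counts[0]:
--                 curr_count = 0
--                 spring_counts.remove(spring_counts[0])
--             else:
--                 return False
--
--     if curr_count > 0: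
--         if curr_count != spring_counts[0]:
--             return False
--         else:
--             spring_counts.remove(spring_counts[0])
--
--     return len(spring_counts) == 0
-- ===== SOURCE B (Python) =====
-- def valid_case(line):
--     # Extract all contiguous '#'-run lengths at once (normalize + split),
--     # then compare the whole sequence against the expected counts.
--     normalized = ''.join(c if c == '#' else ' ' for c in line[0])
--     return [len(w) for w in normalized.split()] == line[1]
-- ===== Notes on version B (the rewrite author's own statement) =====
-- stated objective: simpler
-- what changed: Replaces A's stateful front-popping matcher (mutable counts list, early returns, trailing-run fixup) with extract-then-compare: normalize the string, split it into '#'-runs, and test list equality once.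
import Mathlib
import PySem

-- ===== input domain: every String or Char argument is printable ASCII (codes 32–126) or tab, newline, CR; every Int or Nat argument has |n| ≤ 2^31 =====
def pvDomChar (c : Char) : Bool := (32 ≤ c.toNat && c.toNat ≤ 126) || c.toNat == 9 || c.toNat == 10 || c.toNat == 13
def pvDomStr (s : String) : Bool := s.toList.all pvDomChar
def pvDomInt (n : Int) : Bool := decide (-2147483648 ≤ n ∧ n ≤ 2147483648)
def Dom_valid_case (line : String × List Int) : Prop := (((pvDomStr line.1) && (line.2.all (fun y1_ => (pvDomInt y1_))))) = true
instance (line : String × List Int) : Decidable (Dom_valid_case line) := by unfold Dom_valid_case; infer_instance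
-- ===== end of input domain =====

-- B replaces A's stateful front-popping matcher with extract-all-runs-then-compare (objective: simpler).

-- ===== PORT A =====
-- A's loop over line[0] with state (spring_counts, curr_count) and early returns,
-- followed by the trailing-run fixup and the final emptiness test.
def validGoA : List Char → List Int → Int → Bool
  | [], sc, cc =>
    if cc > 0 then
      match sc with
      | [] => false  -- unreachable in Python (cc > 0 forces sc ≠ []; Python reads sc[0] here)
      | s0 :: rest => if cc ≠ s0 then false else rest.isEmpty
    else sc.isEmpty
  | c :: cs, sc, cc =>
    if c = '#' then
      match sc with
      | [] => false
      | s0 :: _ => if cc + 1 > s0 then false else validGoA cs sc (cc + 1)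
    else if cc > 0 then
      match sc with
      | [] => false
      | s0 :: rest => if cc = s0 then validGoA cs rest 0 else false
    else validGoA cs sc cc

def valid_case (line : String × List Int) : Bool :=
  validGoA line.1.toList line.2 0

-- ===== PORT B =====
def valid_case_alt (line : String × List Int) : Bool :=
  let norm := line.1.toList.map (fun c => if c = '#' then c else ' ')
  decide ((PySem.Chars.split₀ norm).map (fun w => (w.length : Int)) = line.2)

-- ===== PRECONDITION & SPEC =====
def Spec_valid_case (line : String × List Int) (out : Bool) : Prop := out = valid_case_alt line
instance (line : String × List Int) (out : Bool) : Decidable (Spec_valid_case line out) := by unfold Spec_valid_case; infer_instance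

-- ===== CLAIM (what is proved, stated in full; the proofs are below) =====
def Claim_equal_valid_case : Prop := ∀ (line : String × List Int), Dom_valid_case line → Spec_valid_case line (valid_case line)

-- ===== LEMMAS AND PROOFS =====

-- Spec of both programs: run lengths of '#'-groups, with a current open run of length cc.
def pvGfrom : Int → List Char → List Int
  | cc, [] => if 0 < cc then [cc] else []
  | cc, c :: cs => if c = '#' then pvGfrom (cc + 1) cs
                   else if 0 < cc then cc :: pvGfrom 0 cs
                   else pvGfrom 0 cs

lemma pvGfrom_head (cs : List Char) : ∀ cc : Int, 0 < cc → ∃ h t, pvGfrom cc cs = h :: t ∧ cc ≤ h := by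
  induction cs with
  | nil => intro cc h; exact ⟨cc, [], by simp [pvGfrom, h], le_refl _⟩
  | cons c cs ih =>
    intro cc h
    by_cases hc : c = '#'
    · obtain ⟨h', t, he, hle⟩ := ih (cc + 1) (by omega)
      exact ⟨h', t, by simp [pvGfrom, hc, he], by omega⟩
    · exact ⟨cc, pvGfrom 0 cs, by simp [pvGfrom, hc, h], le_refl _⟩

lemma validGoA_eq (cs : List Char) : ∀ (sc : List Int) (cc : Int), 0 ≤ cc →
    validGoA cs sc cc = decide (pvGfrom cc cs = sc) := by
  induction cs with
  | nil =>
    intro sc cc h0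
    by_cases h : 0 < cc
    · match sc with
      | [] =>
        obtain ⟨hh, t, he, _⟩ := pvGfrom_head [] cc h
        simp [validGoA, h, he]
      | s0 :: rest =>
        by_cases he : cc = s0
        · subst he
          simp only [validGoA, if_neg (by omega : ¬ cc ≠ cc), pvGfrom, if_pos h]
          cases rest <;> simp
        · simp [validGoA, h, he, pvGfrom]
    · have : cc = 0 := by omega
      subst this
      simp only [validGoA, if_neg (by omega : ¬ (0:Int) > 0), pvGfrom]
      cases sc <;> simp
  | cons c cs ih =>
    intro sc cc h0
    by_cases hc : c = '#'
    · subst hc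
      match sc with
      | [] =>
        obtain ⟨h', t, he, _⟩ := pvGfrom_head cs (cc + 1) (by omega)
        simp [validGoA, pvGfrom, he]
      | s0 :: rest =>
        by_cases hgt : cc + 1 > s0
        · obtain ⟨h', t, he, hle⟩ := pvGfrom_head cs (cc + 1) (by omega)
          have : pvGfrom (cc + 1) cs ≠ s0 :: rest := by
            rw [he]; intro hcontra
            have : h' = s0 := by injection hcontra
            omega
          simp [validGoA, pvGfrom, hgt, this]
        · simp only [validGoA, if_neg (by omega : ¬ cc + 1 > s0)]
          rw [ih (s0 :: rest) (cc + 1) (by omega)]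
          simp [pvGfrom]
    · by_cases h : 0 < cc
      · match sc with
        | [] => simp [validGoA, hc, h, pvGfrom]
        | s0 :: rest =>
          by_cases he : cc = s0
          · subst he
            simp only [validGoA, if_neg hc, if_pos h]
            rw [ih rest 0 le_rfl]
            simp [pvGfrom, hc, h]
          · simp [validGoA, hc, h, he, pvGfrom]
      · have : cc = 0 := by omega
        subst this
        simp only [validGoA, if_neg hc, if_neg (by omega : ¬ (0:Int) > 0)]
        rw [ih sc 0 le_rfl]
        simp [pvGfrom, hc]

lemma split₀_go_eq (cs : List Char) : ∀ (cur : List Char) (acc : List (List Char)),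
    (PySem.Chars.split₀.go (cs.map (fun c => if c = '#' then c else ' ')) cur acc).map
        (fun w => (w.length : Int))
      = acc.reverse.map (fun w => (w.length : Int)) ++ pvGfrom (cur.length : Int) cs := by
  induction cs with
  | nil =>
    intro cur acc
    by_cases hcur : cur = []
    · simp [PySem.Chars.split₀.go, hcur, pvGfrom]
    · have hlen : (0:Int) < (cur.length : Int) := by
        have := List.length_pos_iff.mpr hcur; exact_mod_cast this
      simp [PySem.Chars.split₀.go, List.isEmpty_iff, hcur, pvGfrom]
  | cons c cs ih =>
    intro cur acc
    by_cases hc : c = '#'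
    · have hf : (if c = '#' then c else ' ') = '#' := by simp [hc]
      simp only [List.map_cons, hf]
      rw [show pvGfrom (cur.length : Int) (c :: cs) = pvGfrom ((cur.length : Int) + 1) cs
            from by simp [pvGfrom, hc]]
      rw [show PySem.Chars.split₀.go ('#' :: cs.map (fun c => if c = '#' then c else ' ')) cur acc
            = PySem.Chars.split₀.go (cs.map (fun c => if c = '#' then c else ' ')) ('#' :: cur) acc
            from rfl]
      rw [ih ('#' :: cur) acc]
      congr 1
    · have hf : (if c = '#' then c else ' ') = ' ' := by simp [hc]
      simp only [List.map_cons, hf]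
      by_cases hcur : cur = []
      · subst hcur
        rw [show PySem.Chars.split₀.go (' ' :: cs.map (fun c => if c = '#' then c else ' ')) [] acc
              = PySem.Chars.split₀.go (cs.map (fun c => if c = '#' then c else ' ')) [] acc
              from rfl]
        rw [ih [] acc]
        simp [pvGfrom, hc]
      · have hlen : (0:Int) < (cur.length : Int) := by
          have := List.length_pos_iff.mpr hcur; exact_mod_cast this
        have hem : cur.isEmpty = false := by
          cases cur with
          | nil => exact absurd rfl hcur
          | cons a l => rfl
        rw [show PySem.Chars.split₀.go (' ' :: cs.map (fun c => if c = '#' then c else ' ')) cur acc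
              = PySem.Chars.split₀.go (cs.map (fun c => if c = '#' then c else ' ')) [] (cur.reverse :: acc)
              from by
                rw [show PySem.Chars.split₀.go (' ' :: cs.map (fun c => if c = '#' then c else ' ')) cur acc
                      = if cur.isEmpty
                        then PySem.Chars.split₀.go (cs.map (fun c => if c = '#' then c else ' ')) [] acc
                        else PySem.Chars.split₀.go (cs.map (fun c => if c = '#' then c else ' ')) []
                               (cur.reverse :: acc)
                      from rfl, hem]
                simp]
        rw [ih [] (cur.reverse :: acc)]
        simp only [pvGfrom, if_neg hc, if_pos hlen, List.reverse_cons, List.map_append]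
        simp

-- ===== VERDICT (by name: the statement is the Claim_ definition above) =====
theorem valid_case_spec : Claim_equal_valid_case := by
  intro line _
  unfold Spec_valid_case valid_case valid_case_alt
  rw [validGoA_eq line.1.toList line.2 0 le_rfl]
  have := split₀_go_eq line.1.toList [] []
  simp only [List.map_nil, List.reverse_nil, List.nil_append, List.length_nil, Int.ofNat_zero] at this
  simp [PySem.Chars.split₀, this]
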